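-- pv_equiv track=rewrite | github.com/pdoshi-smtc/OpenSearch | scripts/extract_terms_data.py | categorize_terms
-- ===== SOURCE A (Python) =====
-- def categorize_terms(terms):
--     """Categorize terms by first letter"""
--     categories = {}
--
--     for term in terms:
--         if term:
--             first_char = term[0].upper()
--             if not first_char.isalpha():
--                 first_char = '#'
--
--             if first_char not in categories:
--                 categories[first_char] = 0
--             categories[first_char] += 1
--
--     return dict(sorted(categories.items()))
-- ===== SOURCE B (Python) =====
-- def _runs(keys):
--     """Run-length encode a sorted key list into [(key, run length), ...]."""
--     if not keys:
--         return []
--     k = keys[0]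
--     n = 1
--     while n < len(keys) and keys[n] == k:
--         n += 1
--     return [(k, n)] + _runs(keys[n:])
--
--
-- def categorize_terms(terms):
--     """Categorize terms by first letter"""
--     keys = []
--     for t in terms:
--         if t:
--             c = t[0].upper()
--             keys.append(c if c.isalpha() else '#')
--     keys.sort()
--     return dict(_runs(keys))
-- ===== Notes on version B (the rewrite author's own statement) =====
-- stated objective: alternative
-- what changed: Replaces A's hash-style dict of counters (membership test, zero-init, increment, then sort the items) by sort-then-scan: collect the category keys, sort them, and run-length encode the sorted list by a recursive scan that jumps over each run, so no counter dictionary is ever maintained.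
import Mathlib
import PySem

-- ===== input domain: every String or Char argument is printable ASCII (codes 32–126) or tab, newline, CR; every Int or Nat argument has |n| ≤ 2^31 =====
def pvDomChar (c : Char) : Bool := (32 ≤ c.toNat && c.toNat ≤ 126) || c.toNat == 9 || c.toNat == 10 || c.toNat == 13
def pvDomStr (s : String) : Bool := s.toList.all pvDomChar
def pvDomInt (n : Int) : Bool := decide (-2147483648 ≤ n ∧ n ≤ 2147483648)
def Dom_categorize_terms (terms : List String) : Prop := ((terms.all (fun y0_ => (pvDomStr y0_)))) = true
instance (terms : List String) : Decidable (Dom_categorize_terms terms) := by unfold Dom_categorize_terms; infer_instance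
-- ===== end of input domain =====

-- B replaces A's incremental counter dict by sort-then-scan: sort the category keys and
-- run-length encode the sorted list by a recursive scan (alternative algorithm, same results).

-- ===== PORT A =====
-- term[0].upper() under the guard term ≠ "": the one-char string term.toList.take 1, uppercased (exact, term nonempty);
-- first_char.isalpha() is PySem.Chars.strIsalpha.
def categorize_terms (terms : List String) : List (String × Int) :=
  let categories : PySem.Dict String Int :=
    terms.foldl (fun d term =>
      if term ≠ "" then
        let fc0 : List Char := PySem.Chars.upper (term.toList.take 1)
        let first_char : String := if PySem.Chars.strIsalpha fc0 then String.ofList fc0 else "#"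
        -- if first_char not in categories: categories[first_char] = 0
        let d1 := if d.contains first_char then d else d.insert first_char 0
        -- categories[first_char] += 1
        d1.insert first_char (d1.getD first_char 0 + 1)
      else d) PySem.Dict.empty
  -- dict(sorted(categories.items())): pairs compared as Python tuples (keys first, then values)
  PySem.List.sorted2 categories.items (fun p => p.1) (fun p => p.2) false

-- ===== PORT B =====
-- _runs(keys) of Source B: n = 1 + length of the leading run of keys[0] in the tail; recurse on keys[n:]
def pvRuns : List String → List (String × Int)
  | [] => []
  | k :: rest =>
      let run := rest.takeWhile (fun x => x == k)
      (k, ((1 : Int) + run.length)) :: pvRuns (rest.dropWhile (fun x => x == k))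
  termination_by l => l.length
  decreasing_by
    simp only [List.length_cons]
    exact Nat.lt_succ_of_le (List.length_dropWhile_le _ _)

def categorize_terms_alt (terms : List String) : List (String × Int) :=
  -- the keys-building loop of Source B (t[0] ported as t.toList.take 1, exact on nonempty t)
  let keys : List String :=
    terms.foldl (fun acc t =>
      if t ≠ "" then
        let c := PySem.Chars.upper (t.toList.take 1)
        acc ++ [if PySem.Chars.strIsalpha c then String.ofList c else "#"]
      else acc) []
  -- keys.sort()
  let sortedKeys := PySem.List.sorted keys (fun x => x) false
  -- dict(_runs(keys))
  (PySem.Dict.ofList (pvRuns sortedKeys)).items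

-- ===== PRECONDITION & SPEC =====
def Spec_categorize_terms (terms : List String) (out : List (String × Int)) : Prop := out = categorize_terms_alt terms
instance (terms : List String) (out : List (String × Int)) : Decidable (Spec_categorize_terms terms out) := by unfold Spec_categorize_terms; infer_instance

-- ===== CLAIM (what is proved, stated in full; the proofs are below) =====
def Claim_equal_categorize_terms : Prop := ∀ (terms : List String), Dom_categorize_terms terms → Spec_categorize_terms terms (categorize_terms terms)

-- ===== LEMMAS AND PROOFS =====

-- the category key of a non-empty term (proof-side abbreviation, shared shape of both ports)
def pvCategory (term : String) : String :=
  let first : List Char := PySem.Chars.upper (term.toList.take 1)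
  if PySem.Chars.strIsalpha first then String.ofList first else "#"

-- insertBy only asks `before x y` for y in the list: congruence there
lemma insertBy_congr_mem {α : Type} (b1 b2 : α → α → Bool) (x : α) (ys : List α)
    (h : ∀ y ∈ ys, b1 x y = b2 x y) :
    PySem.List.insertBy b1 x ys = PySem.List.insertBy b2 x ys := by
  induction ys with
  | nil => rfl
  | cons y ys ih =>
    simp only [PySem.List.insertBy, h y (by simp)]
    split
    · rfl
    · simp only [List.cons.injEq, true_and]
      exact ih (fun z hz => h z (by simp [hz]))

-- insertion sort with two `before` tests that agree on elements of xs gives the same list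
lemma foldl_insertBy_congr {α : Type} (b1 b2 : α → α → Bool) (xs acc : List α)
    (h : ∀ a ∈ xs, ∀ y, y ∈ acc ∨ y ∈ xs → b1 a y = b2 a y) :
    xs.foldl (fun acc x => PySem.List.insertBy b1 x acc) acc
      = xs.foldl (fun acc x => PySem.List.insertBy b2 x acc) acc := by
  induction xs generalizing acc with
  | nil => rfl
  | cons x xs ih =>
    simp only [List.foldl_cons]
    rw [insertBy_congr_mem b1 b2 x acc
      (fun y hy => h x (by simp) y (Or.inl hy))]
    exact ih _ (fun a ha y hy => by
      rcases hy with hy | hy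
      · rcases (PySem.List.mem_insertBy b2 x y acc).1 hy with rfl | hy
        · exact h a (by simp [ha]) y (Or.inr (by simp))
        · exact h a (by simp [ha]) y (Or.inl hy)
      · exact h a (by simp [ha]) y (Or.inr (by simp [hy])))

-- when elements of xs are determined by their first key, tuple-key sorting is first-key sorting
lemma sorted2_eq_sorted_fst {α κ₁ κ₂ : Type} [LinearOrder κ₁] [LinearOrder κ₂]
    (xs : List α) (k1 : α → κ₁) (k2 : α → κ₂)
    (h : ∀ a ∈ xs, ∀ b ∈ xs, k1 a = k1 b → a = b) :
    PySem.List.sorted2 xs k1 k2 false = PySem.List.sorted xs k1 false := by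
  simp only [PySem.List.sorted2, PySem.List.sorted, Bool.false_eq_true, if_false]
  apply foldl_insertBy_congr
  intro a ha y hy
  have hy' : y ∈ xs := hy.resolve_left (by simp)
  rcases lt_trichotomy (k1 a) (k1 y) with hlt | heq | hgt
  · simp [hlt]
  · have : a = y := h a ha y hy' heq
    subst this
    simp
  · simp [hgt, not_lt_of_gt hgt]

-- A's "zero-init then += 1" step is exactly Counter's modify step
lemma upsert_eq_modify (d : PySem.Dict String Int) (k : String) :
    (if d.contains k then d else d.insert k 0).insert k
        ((if d.contains k then d else d.insert k 0).getD k 0 + 1)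
      = d.modify k 0 (· + 1) := by
  by_cases hc : d.contains k
  · simp [hc, PySem.Dict.modify]
  · simp only [hc, Bool.false_eq_true, if_false]
    rw [PySem.Dict.getD_insert_self, PySem.Dict.insert_insert_self, PySem.Dict.modify,
      PySem.Dict.getD_of_not_contains d 0 (by simpa using hc)]

-- A's dict loop is Counter over the category keys of the non-empty terms
lemma dict_loop_eq_counter (terms : List String) :
    terms.foldl (fun d term =>
      if term ≠ "" then
        let fc0 : List Char := PySem.Chars.upper (term.toList.take 1)
        let first_char : String := if PySem.Chars.strIsalpha fc0 then String.ofList fc0 else "#"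
        let d1 := if d.contains first_char then d else d.insert first_char 0
        d1.insert first_char (d1.getD first_char 0 + 1)
      else d) PySem.Dict.empty
      = PySem.Dict.counter ((terms.filter (fun t => t ≠ "")).map pvCategory) := by
  have hbody : (fun (d : PySem.Dict String Int) (term : String) =>
      if term ≠ "" then
        let fc0 : List Char := PySem.Chars.upper (term.toList.take 1)
        let first_char : String := if PySem.Chars.strIsalpha fc0 then String.ofList fc0 else "#"
        let d1 := if d.contains first_char then d else d.insert first_char 0
        d1.insert first_char (d1.getD first_char 0 + 1)
      else d)
      = (fun d term => if term ≠ "" then d.modify (pvCategory term) 0 (· + 1) else d) := by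
    funext d term
    by_cases ht : term ≠ ""
    · simp only [if_pos ht]
      exact upsert_eq_modify d (pvCategory term)
    · simp [ht]
  have h2 := PySem.List.foldl_ite_eq_foldl_filter (p := fun t : String => t ≠ "")
    (f := fun (d : PySem.Dict String Int) t => d.modify (pvCategory t) 0 (· + 1))
    terms PySem.Dict.empty
  rw [hbody, h2,
    ← List.foldl_map (f := pvCategory) (g := fun (d : PySem.Dict String Int) k => d.modify k 0 (· + 1)),
    ← PySem.Dict.counter_eq_foldl]

-- B's keys-building loop is the same filtered map
lemma keys_loop_eq_filter_map (terms : List String) :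
    terms.foldl (fun acc t =>
      if t ≠ "" then
        let c := PySem.Chars.upper (t.toList.take 1)
        acc ++ [if PySem.Chars.strIsalpha c then String.ofList c else "#"]
      else acc) ([] : List String)
      = (terms.filter (fun t => t ≠ "")).map pvCategory := by
  rw [PySem.List.foldl_ite_eq_foldl_filter (p := fun t : String => t ≠ "")
    (f := fun (acc : List String) t =>
      let c := PySem.Chars.upper (t.toList.take 1)
      acc ++ [if PySem.Chars.strIsalpha c then String.ofList c else "#"])]
  exact PySem.List.foldl_append_singleton_eq_map (f := pvCategory)
    (l := terms.filter (fun t => t ≠ "")) (acc := [])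

-- on a (≤)-sorted list, everything after the leading run of the head is strictly above the head
lemma head_lt_of_mem_dropWhile (k : String) (rest : List String)
    (hk_le : ∀ x ∈ rest, k ≤ x) (hrest : rest.Pairwise (· ≤ ·)) :
    ∀ x ∈ rest.dropWhile (fun y => y == k), k < x := by
  cases hre : rest.dropWhile (fun y => y == k) with
  | nil => intro x hx; simp at hx
  | cons h t =>
    have hsub : (rest.dropWhile (fun y => y == k)).Sublist rest := List.dropWhile_sublist _
    have hmem : ∀ x ∈ h :: t, x ∈ rest := fun x hx => hsub.mem (hre ▸ hx)
    have hhk : (h == k) = false := by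
      have := List.head?_dropWhile_not (fun y => y == k) rest
      rw [hre] at this
      simpa using this
    have hkh : k < h :=
      lt_of_le_of_ne (hk_le h (hmem h List.mem_cons_self)) (Ne.symm (by simpa using hhk))
    have hp : (h :: t).Pairwise (· ≤ ·) := hre ▸ hrest.sublist hsub
    intro x hx
    rcases List.mem_cons.1 hx with rfl | hx
    · exact hkh
    · exact lt_of_lt_of_le hkh ((List.pairwise_cons.1 hp).1 x hx)

-- core facts about pvRuns on a (≤)-sorted list: strictly increasing distinct keys,
-- keys = the members of l, values = multiplicities in l
lemma pvRuns_spec (l : List String) (hs : l.Pairwise (· ≤ ·)) :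
    ((pvRuns l).map Prod.fst).Pairwise (· < ·)
    ∧ (∀ x, x ∈ (pvRuns l).map Prod.fst ↔ x ∈ l)
    ∧ (∀ p ∈ pvRuns l, p.2 = (l.count p.1 : Int)) := by
  induction l using pvRuns.induct with
  | case1 => simp [pvRuns]
  | case2 k rest ih =>
    rw [List.pairwise_cons] at hs
    obtain ⟨hk_le, hrest⟩ := hs
    have hsplit : rest.takeWhile (fun x => x == k) ++ rest.dropWhile (fun x => x == k) = rest :=
      List.takeWhile_append_dropWhile
    have hrunk : ∀ x ∈ rest.takeWhile (fun x => x == k), x = k := by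
      intro x hx
      have := List.mem_takeWhile_imp hx
      simpa using this
    have hrest' : (rest.dropWhile (fun x => x == k)).Pairwise (· ≤ ·) :=
      hrest.sublist (List.dropWhile_sublist _)
    have hmem' : ∀ x ∈ rest.dropWhile (fun x => x == k), x ∈ rest :=
      fun x hx => (List.dropWhile_sublist _).mem hx
    have hlt : ∀ x ∈ rest.dropWhile (fun x => x == k), k < x :=
      head_lt_of_mem_dropWhile k rest hk_le hrest
    have hknotin : k ∉ rest.dropWhile (fun x => x == k) := fun hk => lt_irrefl k (hlt k hk)
    obtain ⟨ih1, ih2, ih3⟩ := ih hrest'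
    have hcr : rest.count k = (rest.takeWhile (fun x => x == k)).length := by
      conv_lhs => rw [← hsplit]
      rw [List.count_append, List.count_eq_zero.2 hknotin,
        List.count_eq_length.2 (fun b hb => by simp [hrunk b hb])]
      omega
    refine ⟨?_, ?_, ?_⟩
    · simp only [pvRuns, List.map_cons, List.pairwise_cons]
      exact ⟨fun y hy => hlt y ((ih2 y).1 hy), ih1⟩
    · intro x
      simp only [pvRuns, List.map_cons, List.mem_cons, ih2 x]
      constructor
      · rintro (rfl | hx)
        · exact Or.inl rfl
        · exact Or.inr (hmem' x hx)
      · rintro (rfl | hx)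
        · exact Or.inl rfl
        · rw [← hsplit] at hx
          rcases List.mem_append.1 hx with hx | hx
          · exact Or.inl (hrunk x hx)
          · exact Or.inr hx
    · intro p hp
      simp only [pvRuns, List.mem_cons] at hp
      rcases hp with rfl | hp
      · simp only [List.count_cons_self, hcr]
        push_cast
        ring
      · have hpx : p.1 ∈ rest.dropWhile (fun x => x == k) := (ih2 p.1).1 (List.mem_map_of_mem hp)
        have hpk : p.1 ≠ k := fun h => lt_irrefl k (h ▸ hlt p.1 hpx)
        rw [ih3 p hp]
        congr 1
        rw [List.count_cons_of_ne (Ne.symm (by exact_mod_cast hpk))]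
        conv_rhs => rw [← hsplit]
        rw [List.count_append, List.count_eq_zero.2 (fun hc => hpk (hrunk p.1 hc))]
        omega

-- ===== VERDICT (by name: the statement is the Claim_ definition above) =====
theorem categorize_terms_spec : Claim_equal_categorize_terms := by
  intro terms _
  unfold Spec_categorize_terms categorize_terms categorize_terms_alt
  rw [dict_loop_eq_counter, keys_loop_eq_filter_map]
  set keys : List String := (terms.filter (fun t => t ≠ "")).map pvCategory with hkeys
  set S : List String := PySem.Set.ofList keys with hS
  set f : String → String × Int := fun k => (k, (List.count k keys : Int)) with hf
  set ls : List String := PySem.List.sorted keys (fun x => x) false with hls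
  have hsort : ls.Pairwise (· ≤ ·) := PySem.List.sorted_pairwise keys (fun x => x)
  obtain ⟨h1, h2, h3⟩ := pvRuns_spec ls hsort
  set R : List (String × Int) := pvRuns ls with hR
  have hnodupF : (R.map Prod.fst).Nodup := h1.nodup
  have hpermls : ls.Perm keys := PySem.List.sorted_perm keys (fun x => x) false
  -- the run keys are a permutation of the distinct category keys
  have hpermF : (R.map Prod.fst).Perm S := by
    rw [List.perm_ext_iff_of_nodup hnodupF (PySem.Set.nodup_ofList keys)]
    intro a
    rw [h2 a, PySem.Set.mem_ofList]
    exact hpermls.mem_iff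
  -- the sorted distinct keys ARE the run keys
  have hsortedS : PySem.List.sorted S (fun x => x) false = R.map Prod.fst := by
    apply PySem.List.sorted_eq_of_perm_of_pairwise_lt
    · exact hpermF
    · exact h1
  -- A side: sorted2 over distinct-key pairs is sorting by key, which maps the sorted keys
  have hA : PySem.List.sorted2 (PySem.Dict.counter keys).items (fun p => p.1) (fun p => p.2) false
      = (R.map Prod.fst).map f := by
    rw [PySem.Dict.items_counter keys, sorted2_eq_sorted_fst (S.map f) (fun p => p.1) (fun p => p.2)
      (by
        intro a ha b hb hab
        simp only [hf, List.mem_map] at ha hb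
        obtain ⟨ka, _, rfl⟩ := ha
        obtain ⟨kb, _, rfl⟩ := hb
        simp only at hab
        simp [hab]), ← hsortedS]
    apply PySem.List.sorted_eq_of_perm_of_pairwise_lt
    · exact ((PySem.List.sorted_perm S (fun x => x) false).map f)
    · exact List.Pairwise.map f (fun a b hab => by simp [hf, hab])
        (hsortedS ▸ h1)
  -- each run pair IS f of its key
  have hRf : (R.map Prod.fst).map f = R := by
    rw [List.map_map]
    conv_rhs => rw [← List.map_id R]
    apply List.map_congr_left
    intro p hp
    have hv := h3 p hp
    have hc : List.count p.1 ls = List.count p.1 keys := hpermls.count_eq p.1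
    simp only [Function.comp, hf]
    rw [← hc, ← hv]
    simp
  -- B side: the dict built from the distinct-keyed run list keeps exactly that list
  have hB : (PySem.Dict.ofList R).items = R := by
    have := PySem.Dict.items_foldl_insert_fresh (l := R)
      (k := Prod.fst) (v := Prod.snd) (d := (PySem.Dict.empty : PySem.Dict String Int))
      (fun a _ => PySem.Dict.contains_empty a.1) hnodupF
    simpa [PySem.Dict.ofList, PySem.Dict.update, PySem.Dict.empty] using this
  rw [hB, hA, hRf]
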